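-- pv_equiv track=rewrite | github.com/jialen2/Faculty_movement | analyze/minimum_violation_ranking.py | calculate_ranking_score
-- ===== SOURCE A (Python) =====
-- def get_edge_weight(src, dest, edu_to_work):
--     if src not in edu_to_work:
--         return 0
--     if dest not in edu_to_work[src]:
--         return 0
--     return edu_to_work[src][dest]
--
-- def get_sign(num):
--     if num > 0:
--         return 1
--     elif num < 0:
--         return -1
--     else:
--         return 0
--
-- def calculate_ranking_score(ranking, edu_to_work):
--     score = 0
--     for i in range(len(ranking)):
--         for j in range(i, len(ranking)):
--             src = ranking[i]
--             dest = ranking[j]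
--             score += get_sign(j - i) * get_edge_weight(src, dest, edu_to_work)
--             score += get_sign(i - j) * get_edge_weight(dest, src, edu_to_work)
--     return score
-- ===== SOURCE B (Python) =====
-- def calculate_ranking_score(ranking, edu_to_work):
--     # Iterate over existing edges only; for each edge (src, dest, w) count, in one
--     # forward pass over the ranking, the ordered occurrence pairs it scores on.
--     total = 0
--     for src, dests in edu_to_work.items():
--         for dest, w in dests.items():
--             g = 0
--             before_src = 0
--             before_dest = 0
--             for v in ranking:
--                 if v == dest:
--                     g += before_src
--                 if v == src:
--                     g -= before_dest
--                 if v == src: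
--                     before_src += 1
--                 if v == dest:
--                     before_dest += 1
--             total += w * g
--     return total
-- ===== Notes on version B (the rewrite author's own statement) =====
-- stated objective: alternative
-- what changed: B iterates over the existing edges of the adjacency dict and scores each edge with a single counting pass over the ranking, instead of A's double loop over all ordered index pairs with a dict lookup per pair; B performs no dict lookups at all.
import Mathlib
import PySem

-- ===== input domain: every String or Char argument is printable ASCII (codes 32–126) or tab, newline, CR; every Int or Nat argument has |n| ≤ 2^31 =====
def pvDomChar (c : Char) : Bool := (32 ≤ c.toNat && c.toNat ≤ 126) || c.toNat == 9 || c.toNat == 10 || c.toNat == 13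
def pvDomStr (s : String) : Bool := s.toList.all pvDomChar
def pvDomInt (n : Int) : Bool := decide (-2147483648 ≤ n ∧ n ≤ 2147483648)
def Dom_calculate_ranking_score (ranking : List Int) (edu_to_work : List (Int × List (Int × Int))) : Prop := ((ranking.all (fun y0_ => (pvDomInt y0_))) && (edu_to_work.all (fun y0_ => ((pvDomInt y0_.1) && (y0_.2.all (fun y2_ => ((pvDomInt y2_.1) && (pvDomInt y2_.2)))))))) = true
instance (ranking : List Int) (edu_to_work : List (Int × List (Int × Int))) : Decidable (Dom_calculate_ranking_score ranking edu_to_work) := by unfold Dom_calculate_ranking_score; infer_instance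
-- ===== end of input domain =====

-- B iterates over the existing edges only and scores each edge with one counting pass
-- over the ranking, instead of A's double loop over all index pairs (objective: alternative).

-- ===== PORT A =====
def pvGetSign (num : Int) : Int :=
  if num > 0 then 1 else if num < 0 then -1 else 0

-- dict membership + lookup = first match in the association list (exact for Python dicts)
def pvGetEdgeWeight (src dest : Int) (edu_to_work : List (Int × List (Int × Int))) : Int :=
  match edu_to_work.find? (fun p => p.1 == src) with
  | none => 0
  | some p =>
    match p.2.find? (fun q => q.1 == dest) with
    | none => 0
    | some q => q.2

def calculate_ranking_score (ranking : List Int) (edu_to_work : List (Int × List (Int × Int))) : Int :=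
  -- indices i, j are always in range, so pyGetD is exact for ranking[i] / ranking[j]
  (PySem.List.pyRange 0 (ranking.length : Int) 1).foldl (fun score i =>
    (PySem.List.pyRange i (ranking.length : Int) 1).foldl (fun score j =>
      score + pvGetSign (j - i) * pvGetEdgeWeight (PySem.List.pyGetD ranking i 0) (PySem.List.pyGetD ranking j 0) edu_to_work
            + pvGetSign (i - j) * pvGetEdgeWeight (PySem.List.pyGetD ranking j 0) (PySem.List.pyGetD ranking i 0) edu_to_work) score) 0

-- ===== PORT B =====
-- the per-edge forward pass of Source B: state (g, before_src, before_dest)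
def pvScanPairs (ranking : List Int) (src dest : Int) : Int × Int × Int :=
  ranking.foldl (fun (st : Int × Int × Int) v =>
    ((if v = dest then st.1 + st.2.1 else st.1) - (if v = src then st.2.2 else 0),
     (if v = src then st.2.1 + 1 else st.2.1),
     (if v = dest then st.2.2 + 1 else st.2.2))) (0, 0, 0)

def calculate_ranking_score_alt (ranking : List Int) (edu_to_work : List (Int × List (Int × Int))) : Int :=
  edu_to_work.foldl (fun total p =>
    p.2.foldl (fun total q => total + q.2 * (pvScanPairs ranking p.1 q.1).1) total) 0

-- ===== PRECONDITION & SPEC =====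
-- Pre_ only excludes association lists with duplicate (outer or inner) keys, which do not
-- represent any Python dict (dict keys are unique); it excludes no real Python input.
def Pre_calculate_ranking_score (ranking : List Int) (edu_to_work : List (Int × List (Int × Int))) : Prop :=
  (edu_to_work.map Prod.fst).Nodup ∧ ∀ p ∈ edu_to_work, (p.2.map Prod.fst).Nodup
instance (ranking : List Int) (edu_to_work : List (Int × List (Int × Int))) : Decidable (Pre_calculate_ranking_score ranking edu_to_work) := by unfold Pre_calculate_ranking_score; infer_instance

def pvWitness_calculate_ranking_score : List Int × (List (Int × List (Int × Int))) :=
  ([1, 2], [(1, [(2, 3)])])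

def Spec_calculate_ranking_score (ranking : List Int) (edu_to_work : List (Int × List (Int × Int))) (out : Int) : Prop := out = calculate_ranking_score_alt ranking edu_to_work
instance (ranking : List Int) (edu_to_work : List (Int × List (Int × Int))) (out : Int) : Decidable (Spec_calculate_ranking_score ranking edu_to_work out) := by unfold Spec_calculate_ranking_score; infer_instance

-- ===== CLAIM (what is proved, stated in full; the proofs are below) =====
def Claim_equal_calculate_ranking_score : Prop := ∀ (ranking : List Int) (edu_to_work : List (Int × List (Int × Int))), Dom_calculate_ranking_score ranking edu_to_work → Pre_calculate_ranking_score ranking edu_to_work → Spec_calculate_ranking_score ranking edu_to_work (calculate_ranking_score ranking edu_to_work)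

-- ===== LEMMAS AND PROOFS =====

-- the common mathematical value: sum over ordered pairs of positions
def pvRowSum (x : Int) (t : List Int) (e : List (Int × List (Int × Int))) : Int :=
  (t.map (fun y => pvGetEdgeWeight x y e - pvGetEdgeWeight y x e)).sum

def pvFr : List Int → List (Int × List (Int × Int)) → Int
  | [], _ => 0
  | x :: t, e => pvRowSum x t e + pvFr t e

lemma pvSign_zero : pvGetSign 0 = 0 := rfl

lemma pvSign_pos {n : Int} (h : 0 < n) : pvGetSign n = 1 := by
  simp [pvGetSign, h]

lemma pvSign_neg {n : Int} (h : n < 0) : pvGetSign n = -1 := by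
  simp only [pvGetSign]; rw [if_neg (by omega), if_pos h]

-- ================= A-side =================

lemma pvInnerTail (r : List Int) (e : List (Int × List (Int × Int))) (i : Int) :
    ∀ (m k : Nat), i < (k : Int) → k + m = r.length → ∀ acc : Int,
    (PySem.List.pyRange (k : Int) (r.length : Int) 1).foldl (fun score j =>
      score + pvGetSign (j - i) * pvGetEdgeWeight (PySem.List.pyGetD r i 0) (PySem.List.pyGetD r j 0) e
            + pvGetSign (i - j) * pvGetEdgeWeight (PySem.List.pyGetD r j 0) (PySem.List.pyGetD r i 0) e) acc
    = acc + pvRowSum (PySem.List.pyGetD r i 0) (r.drop k) e := by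
  intro m
  induction m with
  | zero =>
    intro k _ hkm acc
    rw [PySem.List.pyRange_one_eq_nil (by push_cast; omega)]
    have hd : r.drop k = [] := List.drop_eq_nil_of_le (by omega)
    simp [hd, pvRowSum]
  | succ m ih =>
    intro k hik hkm acc
    have hk : k < r.length := by omega
    rw [PySem.List.pyRange_one_cons (by exact_mod_cast hk), List.foldl_cons]
    rw [show ((k : Int) + 1) = ((k + 1 : Nat) : Int) by push_cast; ring]
    rw [ih (k + 1) (by push_cast; omega) (by omega)]
    rw [pvSign_pos (by omega : (0:Int) < (k : Int) - i), pvSign_neg (by omega : i - (k : Int) < 0)]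
    rw [show PySem.List.pyGetD r (k : Int) 0 = r[k] by
      rw [PySem.List.pyGetD_natCast]; exact List.getD_eq_getElem r 0 hk]
    rw [List.drop_eq_getElem_cons hk]
    simp only [pvRowSum, List.map_cons, List.sum_cons]
    ring

lemma pvInnerFull (r : List Int) (e : List (Int × List (Int × Int))) (k : Nat) (hk : k < r.length) (acc : Int) :
    (PySem.List.pyRange (k : Int) (r.length : Int) 1).foldl (fun score j =>
      score + pvGetSign (j - (k : Int)) * pvGetEdgeWeight (PySem.List.pyGetD r (k : Int) 0) (PySem.List.pyGetD r j 0) e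
            + pvGetSign ((k : Int) - j) * pvGetEdgeWeight (PySem.List.pyGetD r j 0) (PySem.List.pyGetD r (k : Int) 0) e) acc
    = acc + pvRowSum r[k] (r.drop (k + 1)) e := by
  rw [PySem.List.pyRange_one_cons (by exact_mod_cast hk), List.foldl_cons]
  rw [show ((k : Int) + 1) = ((k + 1 : Nat) : Int) by push_cast; ring]
  rw [pvInnerTail r e (k : Int) (r.length - (k + 1)) (k + 1) (by push_cast; omega) (by omega)]
  rw [show PySem.List.pyGetD r (k : Int) 0 = r[k] by
    rw [PySem.List.pyGetD_natCast]; exact List.getD_eq_getElem r 0 hk]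
  simp [pvSign_zero]

lemma pvOuter (r : List Int) (e : List (Int × List (Int × Int))) :
    ∀ (m k : Nat), k + m = r.length → ∀ acc : Int,
    (PySem.List.pyRange (k : Int) (r.length : Int) 1).foldl (fun score i =>
      (PySem.List.pyRange i (r.length : Int) 1).foldl (fun score j =>
        score + pvGetSign (j - i) * pvGetEdgeWeight (PySem.List.pyGetD r i 0) (PySem.List.pyGetD r j 0) e
              + pvGetSign (i - j) * pvGetEdgeWeight (PySem.List.pyGetD r j 0) (PySem.List.pyGetD r i 0) e) score) acc
    = acc + pvFr (r.drop k) e := by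
  intro m
  induction m with
  | zero =>
    intro k hkm acc
    rw [PySem.List.pyRange_one_eq_nil (by push_cast; omega)]
    have hd : r.drop k = [] := List.drop_eq_nil_of_le (by omega)
    simp [hd, pvFr]
  | succ m ih =>
    intro k hkm acc
    have hk : k < r.length := by omega
    rw [PySem.List.pyRange_one_cons (by exact_mod_cast hk), List.foldl_cons]
    rw [show ((k : Int) + 1) = ((k + 1 : Nat) : Int) by push_cast; ring]
    rw [ih (k + 1) (by omega)]
    rw [pvInnerFull r e k hk]
    rw [List.drop_eq_getElem_cons hk]
    simp only [pvFr]
    ring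

lemma pvA_eq (r : List Int) (e : List (Int × List (Int × Int))) :
    calculate_ranking_score r e = pvFr r e := by
  have h := pvOuter r e r.length 0 (by omega) 0
  simp only [Nat.cast_zero, List.drop_zero, zero_add] at h
  unfold calculate_ranking_score
  exact h

-- ================= B-side =================

lemma pvScanInv (s d : Int) :
    ∀ (r : List Int) (g bs bd : Int),
    (r.foldl (fun (st : Int × Int × Int) v =>
      ((if v = d then st.1 + st.2.1 else st.1) - (if v = s then st.2.2 else 0),
       (if v = s then st.2.1 + 1 else st.2.1),
       (if v = d then st.2.2 + 1 else st.2.2))) (g, bs, bd)).1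
    = g + bs * (r.count d : Int) - bd * (r.count s : Int) + (pvScanPairs r s d).1 := by
  intro r
  induction r with
  | nil => intro g bs bd; simp [pvScanPairs]
  | cons v t ih =>
    intro g bs bd
    simp only [pvScanPairs, List.foldl_cons] at *
    rw [ih, ih ((if v = d then (0:Int) + 0 else 0) - (if v = s then (0:Int) else 0))]
    by_cases hvd : v = d <;> by_cases hvs : v = s <;>
      simp [hvd, hvs, List.count_cons] <;> split_ifs <;> push_cast <;>
      first | ring | (exfalso; omega) | omega

lemma pvG_cons (v : Int) (t : List Int) (s d : Int) :
    (pvScanPairs (v :: t) s d).1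
    = (if v = s then (t.count d : Int) else 0) - (if v = d then (t.count s : Int) else 0)
      + (pvScanPairs t s d).1 := by
  have h := pvScanInv s d (v :: t) 0 0 0
  simp only [List.foldl_cons] at h
  rw [show pvScanPairs (v :: t) s d = ((v :: t).foldl (fun (st : Int × Int × Int) v =>
      ((if v = d then st.1 + st.2.1 else st.1) - (if v = s then st.2.2 else 0),
       (if v = s then st.2.1 + 1 else st.2.1),
       (if v = d then st.2.2 + 1 else st.2.2))) (0, 0, 0)) from rfl]
  simp only [List.foldl_cons]
  rw [pvScanInv]
  by_cases hvd : v = d <;> by_cases hvs : v = s <;> simp [hvd, hvs, List.count_cons] <;>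
    split_ifs <;> push_cast <;> first | ring | (exfalso; omega) | omega

def pvEdgeSum (r : List Int) (e : List (Int × List (Int × Int))) : Int :=
  (e.map (fun p => (p.2.map (fun q => q.2 * (pvScanPairs r p.1 q.1).1)).sum)).sum

lemma pvB_eq (r : List Int) :
    ∀ (e : List (Int × List (Int × Int))) (acc : Int),
    e.foldl (fun total p =>
      p.2.foldl (fun total q => total + q.2 * (pvScanPairs r p.1 q.1).1) total) acc
    = acc + pvEdgeSum r e := by
  intro e
  induction e with
  | nil => intro acc; simp [pvEdgeSum]
  | cons p e' ih =>
    intro acc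
    simp only [List.foldl_cons]
    rw [PySem.List.foldl_add, ih]
    simp [pvEdgeSum]
    ring

-- inner weighted indicator sum = inner dict lookup (needs unique inner keys)
lemma pvL0 (l : List (Int × Int)) (b : Int) (h : b ∉ l.map Prod.fst) :
    (l.map (fun q => if b = q.1 then q.2 else 0)).sum = 0 := by
  induction l with
  | nil => simp
  | cons q l' ih =>
    simp only [List.map_cons, List.mem_cons, List.sum_cons] at *
    have hb : b ≠ q.1 := fun hc => h (Or.inl hc)
    rw [if_neg hb, ih (fun hc => h (Or.inr hc))]
    ring

lemma pvL1 (l : List (Int × Int)) (b : Int) (h : (l.map Prod.fst).Nodup) :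
    (l.map (fun q => if b = q.1 then q.2 else 0)).sum
    = (match l.find? (fun q => q.1 == b) with | none => 0 | some q => q.2) := by
  induction l with
  | nil => simp
  | cons q l' ih =>
    simp only [List.map_cons, List.sum_cons, List.find?_cons] at *
    by_cases hq : b = q.1
    · rw [if_pos hq]
      have hnotin : b ∉ l'.map Prod.fst := by
        rw [← hq] at h; exact (List.nodup_cons.mp h).1
      rw [pvL0 l' b hnotin]
      have : (q.1 == b) = true := by simp [hq.symm]
      simp [this]
    · rw [if_neg hq]
      have : (q.1 == b) = false := by simp; exact fun hc => hq hc.symm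
      simp only [this, Bool.false_eq_true, if_neg, zero_add]
      exact ih (List.nodup_cons.mp h).2

lemma pvL0' (e : List (Int × List (Int × Int))) (a : Int) (f : Int × List (Int × Int) → Int)
    (h : a ∉ e.map Prod.fst) :
    (e.map (fun p => if a = p.1 then f p else 0)).sum = 0 := by
  induction e with
  | nil => simp
  | cons p e' ih =>
    simp only [List.map_cons, List.mem_cons, List.sum_cons] at *
    rw [if_neg (fun hc => h (Or.inl hc)), ih (fun hc => h (Or.inr hc))]
    ring

-- double weighted indicator sum = edge weight lookup
lemma pvL (e : List (Int × List (Int × Int))) (h1 : (e.map Prod.fst).Nodup)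
    (h2 : ∀ p ∈ e, (p.2.map Prod.fst).Nodup) (a b : Int) :
    (e.map (fun p => if a = p.1 then (p.2.map (fun q => if b = q.1 then q.2 else 0)).sum else 0)).sum
    = pvGetEdgeWeight a b e := by
  induction e with
  | nil => simp [pvGetEdgeWeight]
  | cons p e' ih =>
    simp only [List.map_cons, List.sum_cons] at *
    by_cases hp : a = p.1
    · rw [if_pos hp]
      have hnotin : a ∉ e'.map Prod.fst := by
        rw [← hp] at h1; exact ((List.nodup_cons.mp h1).1 : _)
      rw [pvL0' e' a _ hnotin]
      have hfind : (p.1 == a) = true := by simp [hp.symm]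
      simp only [pvGetEdgeWeight, List.find?_cons, hfind]
      rw [pvL1 p.2 b (h2 p (List.mem_cons_self))]
      ring
    · rw [if_neg hp]
      have hfind : (p.1 == a) = false := by simp; exact fun hc => hp hc.symm
      simp only [pvGetEdgeWeight, List.find?_cons, hfind] at *
      rw [ih (List.nodup_cons.mp h1).2 (fun q hq => h2 q (List.mem_cons_of_mem p hq))]
      simp [pvGetEdgeWeight]

lemma pvSumSub {α : Type} (l : List α) (f g : α → Int) :
    (l.map (fun x => f x - g x)).sum = (l.map f).sum - (l.map g).sum := by
  induction l with
  | nil => simp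
  | cons a l ih => simp only [List.map_cons, List.sum_cons, ih]; ring

lemma pvIteSumOut {α : Type} (c : Prop) [Decidable c] (l : List α) (f : α → Int) :
    (l.map (fun q => if c then f q else 0)).sum = if c then (l.map f).sum else 0 := by
  split_ifs <;> simp

lemma pvX1 (e : List (Int × List (Int × Int))) (h1 : (e.map Prod.fst).Nodup)
    (h2 : ∀ p ∈ e, (p.2.map Prod.fst).Nodup) (v : Int) :
    ∀ t : List Int,
    (e.map (fun p => if v = p.1 then (p.2.map (fun q => q.2 * (t.count q.1 : Int))).sum else 0)).sum
    = (t.map (fun y => pvGetEdgeWeight v y e)).sum := by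
  intro t
  induction t with
  | nil => simp
  | cons y t' ih =>
    have hpt : ∀ p : Int × List (Int × Int),
        (if v = p.1 then ((p.2.map (fun q => q.2 * (((y :: t').count q.1 : Nat) : Int))).sum) else 0)
        = (if v = p.1 then (p.2.map (fun q => if y = q.1 then q.2 else 0)).sum else 0)
          + (if v = p.1 then (p.2.map (fun q => q.2 * ((t'.count q.1 : Nat) : Int))).sum else 0) := by
      intro p
      by_cases hp : v = p.1
      · simp only [if_pos hp]
        rw [← PySem.List.sum_map_add_int]
        congr 1
        apply List.map_congr_left
        intro q _
        simp only [List.count_cons, beq_iff_eq]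
        rcases eq_or_ne y q.1 with h | h
        · simp [h]; push_cast; ring
        · simp [h, h.symm]
      · simp [hp]
    rw [List.map_congr_left (fun p _ => hpt p), PySem.List.sum_map_add_int,
        pvL e h1 h2 v y, ih]
    simp

lemma pvX2 (e : List (Int × List (Int × Int))) (h1 : (e.map Prod.fst).Nodup)
    (h2 : ∀ p ∈ e, (p.2.map Prod.fst).Nodup) (v : Int) :
    ∀ t : List Int,
    (e.map (fun p => (p.2.map (fun q => if v = q.1 then q.2 * (t.count p.1 : Int) else 0)).sum)).sum
    = (t.map (fun y => pvGetEdgeWeight y v e)).sum := by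
  intro t
  induction t with
  | nil => simp
  | cons y t' ih =>
    have hpt : ∀ p : Int × List (Int × Int),
        ((p.2.map (fun q => if v = q.1 then q.2 * (((y :: t').count p.1 : Nat) : Int) else 0)).sum)
        = (if y = p.1 then (p.2.map (fun q => if v = q.1 then q.2 else 0)).sum else 0)
          + (p.2.map (fun q => if v = q.1 then q.2 * ((t'.count p.1 : Nat) : Int) else 0)).sum := by
      intro p
      rw [← pvIteSumOut (y = p.1) p.2 (fun q => if v = q.1 then q.2 else 0),
          ← PySem.List.sum_map_add_int]
      congr 1
      apply List.map_congr_left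
      intro q _
      simp only [List.count_cons, beq_iff_eq]
      rcases eq_or_ne y p.1 with h | h <;> by_cases hv : v = q.1 <;>
        simp [h, hv] <;> first | (push_cast; ring) | simp [h.symm]
    rw [List.map_congr_left (fun p _ => hpt p), PySem.List.sum_map_add_int,
        pvL e h1 h2 y v, ih]
    simp

lemma pvMain (e : List (Int × List (Int × Int))) (h1 : (e.map Prod.fst).Nodup)
    (h2 : ∀ p ∈ e, (p.2.map Prod.fst).Nodup) :
    ∀ r : List Int, pvEdgeSum r e = pvFr r e := by
  intro r
  induction r with
  | nil => simp [pvEdgeSum, pvScanPairs, pvFr]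
  | cons v t ih =>
    have hpt : ∀ p : Int × List (Int × Int),
        ((p.2.map (fun q => q.2 * (pvScanPairs (v :: t) p.1 q.1).1)).sum)
        = ((if v = p.1 then (p.2.map (fun q => q.2 * ((t.count q.1 : Nat) : Int))).sum else 0)
            - (p.2.map (fun q => if v = q.1 then q.2 * ((t.count p.1 : Nat) : Int) else 0)).sum)
          + (p.2.map (fun q => q.2 * (pvScanPairs t p.1 q.1).1)).sum := by
      intro p
      rw [← pvIteSumOut (v = p.1) p.2 (fun q => q.2 * ((t.count q.1 : Nat) : Int)),
          ← pvSumSub, ← PySem.List.sum_map_add_int]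
      congr 1
      apply List.map_congr_left
      intro q _
      rw [pvG_cons]
      by_cases h1 : v = p.1 <;> by_cases h2 : v = q.1 <;> simp [h1, h2] <;>
        split_ifs <;> push_cast <;> ring
    unfold pvEdgeSum
    rw [List.map_congr_left (fun p _ => hpt p), PySem.List.sum_map_add_int, pvSumSub,
        pvX1 e h1 h2 v t, pvX2 e h1 h2 v t]
    have h3 : (List.map (fun p => (List.map (fun q => q.2 * (pvScanPairs t p.1 q.1).1) p.2).sum) e).sum
        = pvEdgeSum t e := rfl
    rw [h3, ih]
    simp only [pvFr, pvRowSum, pvSumSub]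

-- ===== VERDICT (by name: the statement is the Claim_ definition above) =====
theorem calculate_ranking_score_spec : Claim_equal_calculate_ranking_score := by
  intro r e _hdom hpre
  unfold Spec_calculate_ranking_score
  rw [pvA_eq r e]
  unfold calculate_ranking_score_alt
  rw [pvB_eq r e 0, pvMain e hpre.1 hpre.2 r]
  ring
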